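-- pv_equiv track=rewrite | github.com/dmccloskey/SBaaS_base | SBaaS_base/sbaas_template_py.py | make_postgresql_modelClasses_py
-- ===== SOURCE A (Python) =====
-- def make_postgresql_modelClasses_py(
--
--     table_name,columns):
--     '''generate the .py text for an sqlalchemy model class
--     INPUT:
--     table_name = string
--     columns = string
--     OUTPUT
--     text_py = string
--     '''
--     class_name = 'class %s(Base):\n' %table_name
--
--     tablename = "    __tablename__ = '%s'\n" %table_name
--
--     attributes = "    id = Column(Integer, Sequence('%s_id_seq'), primary_key=True)\n" %table_name
--     for column in columns:
--         attributes += "    %s = Column(Text)\n" %column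
--     attributes += '    used_ = Column(Boolean)\n    comment_ = Column(Text)\n'
--
--     table_args = "    #__table_args__ = (UniqueConstraint('',),)\n"
--
--     init = '    def __init__(self,row_dict_I,):\n'
--     for column in columns:
--         init += ("        self.%s = row_dict_I['%s']\n" %(column,column))
--     init += "        self.used_=row_dict_I['used_']\n        self.comment_=row_dict_I['comment_']\n"
--
--     set_row = '    def __set__row__(self,'
--     for column in columns:
--         set_row += "%s_I,"%column
--     set_row += 'used__I,comment__I):\n'
--     for column in columns:
--         set_row += ("        self.%s = %s_I\n" %(column,column))
--     set_row += "        self.used_ = used__I\n        self.comment_ = comment__I\n"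
--
--     repr_dict = '    def __repr__dict__(self):\n        return {\n'
--     for column in columns:
--         repr_dict += ("        '%s':self.%s,\n" %(column,column))
--     repr_dict += "        'id':self.id,\n        'used_':self.used_,\n        'comment_':self.comment_,\n"
--     repr_dict += '        }\n'
--
--     repr_json = "    def __repr__json__(self):\n        return json.dumps(self.__repr__dict__())\n"
--
--     text_py = ("%s%s%s%s%s%s%s%s" %(class_name,tablename,attributes,table_args,init,set_row,repr_dict,repr_json))
--     return text_py
-- ===== SOURCE B (Python) =====
-- def _expand(template, name):
--     out = ''
--     for ch in template:
--         out += name if ch == '\x00' else ch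
--     return out
--
--
-- def make_postgresql_modelClasses_py(table_name, columns):
--     # The class source is described declaratively: a list of (fixed text, per-column
--     # template with '\x00' as the column-name placeholder) sections plus a fixed tail;
--     # a generic renderer expands the templates.
--     head = ("class %s(Base):\n"
--             "    __tablename__ = '%s'\n"
--             "    id = Column(Integer, Sequence('%s_id_seq'), primary_key=True)\n"
--             % (table_name, table_name, table_name))
--     sections = [
--         (head, "    \x00 = Column(Text)\n"),
--         ("    used_ = Column(Boolean)\n    comment_ = Column(Text)\n"
--          "    #__table_args__ = (UniqueConstraint('',),)\n"
--          "    def __init__(self,row_dict_I,):\n",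
--          "        self.\x00 = row_dict_I['\x00']\n"),
--         ("        self.used_=row_dict_I['used_']\n        self.comment_=row_dict_I['comment_']\n"
--          "    def __set__row__(self,",
--          "\x00_I,"),
--         ("used__I,comment__I):\n", "        self.\x00 = \x00_I\n"),
--         ("        self.used_ = used__I\n        self.comment_ = comment__I\n"
--          "    def __repr__dict__(self):\n        return {\n",
--          "        '\x00':self.\x00,\n"),
--     ]
--     tail = ("        'id':self.id,\n        'used_':self.used_,\n        'comment_':self.comment_,\n"
--             "        }\n"
--             "    def __repr__json__(self):\n        return json.dumps(self.__repr__dict__())\n")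
--     parts = []
--     for fixed, tpl in sections:
--         parts.append(fixed)
--         for c in columns:
--             parts.append(_expand(tpl, c))
--     parts.append(tail)
--     return ''.join(parts)
-- ===== Notes on version B (the rewrite author's own statement) =====
-- stated objective: alternative
-- what changed: B replaces A's hard-coded five per-section loops with a declarative data representation of the class source -- a list of (fixed text, per-column template) sections plus a tail -- rendered by a generic placeholder-substitution interpreter over a parts list.
import Mathlib
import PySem

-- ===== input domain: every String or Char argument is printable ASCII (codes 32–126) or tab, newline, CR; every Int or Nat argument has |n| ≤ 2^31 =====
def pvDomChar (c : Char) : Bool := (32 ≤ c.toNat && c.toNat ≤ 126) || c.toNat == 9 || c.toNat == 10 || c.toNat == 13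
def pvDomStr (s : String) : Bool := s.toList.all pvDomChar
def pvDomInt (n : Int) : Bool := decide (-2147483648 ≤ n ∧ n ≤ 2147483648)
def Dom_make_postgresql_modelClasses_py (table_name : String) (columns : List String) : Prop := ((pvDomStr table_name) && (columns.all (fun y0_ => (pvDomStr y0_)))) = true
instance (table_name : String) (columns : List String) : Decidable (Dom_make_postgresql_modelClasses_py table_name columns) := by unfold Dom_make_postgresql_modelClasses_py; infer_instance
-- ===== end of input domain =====

-- B describes the class source declaratively as (fixed text, per-column template) sections
-- rendered by a generic placeholder-substitution interpreter (objective: alternative, same output).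

-- ===== PORT A =====
-- A: five separate loops over columns, each extending one of the section strings.
def make_postgresql_modelClasses_py (table_name : String) (columns : List String) : String :=
  let class_name := "class " ++ table_name ++ "(Base):\n"
  let tablename := "    __tablename__ = '" ++ table_name ++ "'\n"
  let attributes := columns.foldl
    (fun acc column => acc ++ "    " ++ column ++ " = Column(Text)\n")
    ("    id = Column(Integer, Sequence('" ++ table_name ++ "_id_seq'), primary_key=True)\n")
  let attributes := attributes ++ "    used_ = Column(Boolean)\n    comment_ = Column(Text)\n"
  let table_args := "    #__table_args__ = (UniqueConstraint('',),)\n"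
  let init := columns.foldl
    (fun acc column => acc ++ "        self." ++ column ++ " = row_dict_I['" ++ column ++ "']\n")
    "    def __init__(self,row_dict_I,):\n"
  let init := init ++ "        self.used_=row_dict_I['used_']\n        self.comment_=row_dict_I['comment_']\n"
  let set_row := columns.foldl
    (fun acc column => acc ++ column ++ "_I,")
    "    def __set__row__(self,"
  let set_row := set_row ++ "used__I,comment__I):\n"
  let set_row := columns.foldl
    (fun acc column => acc ++ "        self." ++ column ++ " = " ++ column ++ "_I\n")
    set_row
  let set_row := set_row ++ "        self.used_ = used__I\n        self.comment_ = comment__I\n"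
  let repr_dict := columns.foldl
    (fun acc column => acc ++ "        '" ++ column ++ "':self." ++ column ++ ",\n")
    "    def __repr__dict__(self):\n        return {\n"
  let repr_dict := repr_dict ++ "        'id':self.id,\n        'used_':self.used_,\n        'comment_':self.comment_,\n"
  let repr_dict := repr_dict ++ "        }\n"
  let repr_json := "    def __repr__json__(self):\n        return json.dumps(self.__repr__dict__())\n"
  class_name ++ tablename ++ attributes ++ table_args ++ init ++ set_row ++ repr_dict ++ repr_json

-- ===== PORT B =====
-- _expand: char-by-char walk over the template, splicing `name` at each '\x00' placeholder.
def pvExpand (template : String) (name : String) : String :=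
  template.toList.foldl
    (fun out ch => out ++ (if ch = Char.ofNat 0 then name else ch.toString)) ""

-- B: declarative (fixed, template) sections + tail, rendered into a parts list, then joined.
def make_postgresql_modelClasses_py_alt (table_name : String) (columns : List String) : String :=
  let head := "class " ++ table_name ++ "(Base):\n    __tablename__ = '" ++ table_name
      ++ "'\n    id = Column(Integer, Sequence('" ++ table_name ++ "_id_seq'), primary_key=True)\n"
  let sections : List (String × String) :=
    [ (head, "    \x00 = Column(Text)\n"),
      ("    used_ = Column(Boolean)\n    comment_ = Column(Text)\n    #__table_args__ = (UniqueConstraint('',),)\n    def __init__(self,row_dict_I,):\n",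
       "        self.\x00 = row_dict_I['\x00']\n"),
      ("        self.used_=row_dict_I['used_']\n        self.comment_=row_dict_I['comment_']\n    def __set__row__(self,",
       "\x00_I,"),
      ("used__I,comment__I):\n", "        self.\x00 = \x00_I\n"),
      ("        self.used_ = used__I\n        self.comment_ = comment__I\n    def __repr__dict__(self):\n        return {\n",
       "        '\x00':self.\x00,\n") ]
  let tail := "        'id':self.id,\n        'used_':self.used_,\n        'comment_':self.comment_,\n        }\n    def __repr__json__(self):\n        return json.dumps(self.__repr__dict__())\n"
  let parts := sections.foldl
    (fun parts sec =>
      columns.foldl (fun ps c => ps ++ [pvExpand sec.2 c]) (parts ++ [sec.1]))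
    []
  String.join (parts ++ [tail])

-- ===== PRECONDITION & SPEC =====
def Spec_make_postgresql_modelClasses_py (table_name : String) (columns : List String) (out : String) : Prop := out = make_postgresql_modelClasses_py_alt table_name columns
instance (table_name : String) (columns : List String) (out : String) : Decidable (Spec_make_postgresql_modelClasses_py table_name columns out) := by unfold Spec_make_postgresql_modelClasses_py; infer_instance

-- ===== CLAIM =====
def Claim_equal_make_postgresql_modelClasses_py : Prop := ∀ (table_name : String) (columns : List String), Dom_make_postgresql_modelClasses_py table_name columns → Spec_make_postgresql_modelClasses_py table_name columns (make_postgresql_modelClasses_py table_name columns)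

-- ===== LEMMAS AND PROOFS =====

-- folding ++ over a list of strings from seed s is s followed by their join
theorem foldl_join (l : List String) (s : String) :
    l.foldl (fun r t => r ++ t) s = s ++ String.join l := by
  induction l generalizing s with
  | nil =>
      have h : String.join ([] : List String) = "" := rfl
      rw [List.foldl_nil, h, String.append_empty]
  | cons c cs ih =>
      have hj : String.join (c :: cs) = c ++ String.join cs := by
        have h1 : String.join (c :: cs) = cs.foldl (fun r t => r ++ t) ("" ++ c) := rfl
        rw [h1, ih, String.empty_append]
      rw [List.foldl_cons, ih, hj, String.append_assoc]

-- a string-extending foldl is the seed followed by the joined mapped fragments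
theorem foldl_append_join (f : String → String) (cols : List String) (s : String) :
    cols.foldl (fun acc c => acc ++ f c) s = s ++ String.join (cols.map f) := by
  induction cols generalizing s with
  | nil =>
      have h : String.join ([] : List String) = "" := rfl
      rw [List.map_nil, List.foldl_nil, h, String.append_empty]
  | cons c cs ih =>
      have hj : String.join (f c :: cs.map f) = f c ++ String.join (cs.map f) := by
        have h1 : String.join (f c :: cs.map f)
            = (cs.map f).foldl (fun r t => r ++ t) ("" ++ f c) := rfl
        rw [h1, foldl_join, String.empty_append]
      rw [List.map_cons, List.foldl_cons, ih, hj, String.append_assoc]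

-- the template interpreter splices name.toList at each NUL of the template
theorem expand_aux (l : List Char) (name acc : String) :
    l.foldl (fun out ch => out ++ (if ch = Char.ofNat 0 then name else ch.toString)) acc
      = acc ++ String.ofList (l.flatMap (fun ch => if ch = Char.ofNat 0 then name.toList else [ch])) := by
  induction l generalizing acc with
  | nil => rw [List.foldl_nil, List.flatMap_nil, String.ofList_nil, String.append_empty]
  | cons c cs ih =>
      rw [List.foldl_cons, ih, List.flatMap_cons, String.ofList_append, ← String.append_assoc]
      congr 1
      split_ifs with h
      · rw [String.ofList_toList]
      · rfl

theorem expand_eq (tpl name : String) :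
    pvExpand tpl name
      = String.ofList (tpl.toList.flatMap
          (fun ch => if ch = Char.ofNat 0 then name.toList else [ch])) := by
  unfold pvExpand
  rw [expand_aux, String.empty_append]

-- expansions of the five concrete templates
theorem expand1 : pvExpand "    \x00 = Column(Text)\n" = fun c => "    " ++ c ++ " = Column(Text)\n" := by
  funext c
  rw [expand_eq]
  have hl : (("    \x00 = Column(Text)\n" : String).toList.flatMap
      (fun ch => if ch = Char.ofNat 0 then c.toList else [ch])) = ("    " : String).toList ++ c.toList ++ (" = Column(Text)\n" : String).toList := by
    simp
  rw [hl]
  rw [String.ext_iff]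
  simp [String.toList_append]
theorem expand2 : pvExpand "        self.\x00 = row_dict_I['\x00']\n" = fun c => "        self." ++ c ++ " = row_dict_I['" ++ c ++ "']\n" := by
  funext c
  rw [expand_eq]
  have hl : (("        self.\x00 = row_dict_I[\'\x00\']\n" : String).toList.flatMap
      (fun ch => if ch = Char.ofNat 0 then c.toList else [ch])) = ("        self." : String).toList ++ c.toList ++ (" = row_dict_I[\'" : String).toList ++ c.toList ++ ("\']\n" : String).toList := by
    simp
  rw [hl]
  rw [String.ext_iff]
  simp [String.toList_append]
theorem expand3 : pvExpand "\x00_I," = fun c => c ++ "_I," := by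
  funext c
  rw [expand_eq]
  have hl : (("\x00_I," : String).toList.flatMap
      (fun ch => if ch = Char.ofNat 0 then c.toList else [ch])) = ("" : String).toList ++ c.toList ++ ("_I," : String).toList := by
    simp
  rw [hl]
  rw [String.ext_iff]
  simp [String.toList_append]
theorem expand4 : pvExpand "        self.\x00 = \x00_I\n" = fun c => "        self." ++ c ++ " = " ++ c ++ "_I\n" := by
  funext c
  rw [expand_eq]
  have hl : (("        self.\x00 = \x00_I\n" : String).toList.flatMap
      (fun ch => if ch = Char.ofNat 0 then c.toList else [ch])) = ("        self." : String).toList ++ c.toList ++ (" = " : String).toList ++ c.toList ++ ("_I\n" : String).toList := by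
    simp
  rw [hl]
  rw [String.ext_iff]
  simp [String.toList_append]
theorem expand5 : pvExpand "        '\x00':self.\x00,\n" = fun c => "        '" ++ c ++ "':self." ++ c ++ ",\n" := by
  funext c
  rw [expand_eq]
  have hl : (("        \'\x00\':self.\x00,\n" : String).toList.flatMap
      (fun ch => if ch = Char.ofNat 0 then c.toList else [ch])) = ("        \'" : String).toList ++ c.toList ++ ("\':self." : String).toList ++ c.toList ++ (",\n" : String).toList := by
    simp
  rw [hl]
  rw [String.ext_iff]
  simp [String.toList_append]

-- String.join distributes over list append
theorem join_append (l1 l2 : List String) :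
    String.join (l1 ++ l2) = String.join l1 ++ String.join l2 := by
  have h1 : String.join (l1 ++ l2) = (l1 ++ l2).foldl (fun r t => r ++ t) "" := rfl
  have h2 : String.join l2 = l2.foldl (fun r t => r ++ t) "" := rfl
  rw [h1, List.foldl_append, foldl_join l2]
  rfl

theorem join_cons (s : String) (l : List String) : String.join (s :: l) = s ++ String.join l := by
  have h : String.join (s :: l) = l.foldl (fun r t => r ++ t) ("" ++ s) := rfl
  rw [h, foldl_join, String.empty_append]

-- ===== VERDICT =====
theorem make_postgresql_modelClasses_py_spec : Claim_equal_make_postgresql_modelClasses_py := by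
  intro table_name columns _
  show make_postgresql_modelClasses_py table_name columns = make_postgresql_modelClasses_py_alt table_name columns
  unfold make_postgresql_modelClasses_py make_postgresql_modelClasses_py_alt
  simp only [List.foldl_cons, List.foldl_nil, PySem.List.foldl_append_singleton_eq_map,
             List.nil_append, List.append_assoc, List.cons_append,
             expand1, expand2, expand3, expand4, expand5,
             foldl_append_join, String.append_assoc, join_append, join_cons]
  rw [String.ext_iff]
  simp [String.toList_append]
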